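-- pv_equiv track=rewrite | github.com/TrevorOYS/CS204-BrowserNetworkAnalysis | browserbench/server.py | _json_payload
-- ===== SOURCE A (Python) =====
-- def _json_payload(kb: int, variant: str) -> str:
--     header = (
--         "{"
--         f"\"variant\":\"{variant}\","
--         "\"items\":["
--     )
--     footer = "]}"
--     body = []
--     while len((header + "".join(body) + footer).encode("utf-8")) < (kb * 1024) - 32:
--         body.append("\"browserbench-payload\",")
--     payload = header + "".join(body).rstrip(",") + footer
--     return payload
-- ===== SOURCE B (Python) =====
-- def _json_payload(kb: int, variant: str) -> str:
--     header = "{" f"\"variant\":\"{variant}\"," "\"items\":["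
--     item = "\"browserbench-payload\","
--     need = (kb * 1024 - 32) - len(header.encode("utf-8")) - len("]}".encode("utf-8"))
--     n = max(0, -(-need // len(item.encode("utf-8"))))
--     return header + ",".join(["\"browserbench-payload\""] * n) + "]}"
-- ===== Notes on version B (the rewrite author's own statement) =====
-- stated objective: faster
-- what changed: Replaces the grow-and-re-encode loop (which re-encodes the whole payload every iteration) by a closed-form ceiling-division count of items and a single join.
import Mathlib
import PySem

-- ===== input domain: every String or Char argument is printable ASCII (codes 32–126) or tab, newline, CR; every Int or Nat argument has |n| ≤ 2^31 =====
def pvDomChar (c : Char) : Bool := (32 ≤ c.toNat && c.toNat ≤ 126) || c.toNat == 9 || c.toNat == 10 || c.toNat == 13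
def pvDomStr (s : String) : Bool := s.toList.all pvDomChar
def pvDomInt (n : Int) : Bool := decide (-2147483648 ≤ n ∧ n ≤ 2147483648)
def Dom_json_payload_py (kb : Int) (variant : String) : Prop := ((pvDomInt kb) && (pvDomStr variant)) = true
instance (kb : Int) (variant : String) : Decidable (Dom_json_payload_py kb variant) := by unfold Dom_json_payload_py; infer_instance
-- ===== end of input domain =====

-- B replaces A's grow-and-re-encode loop by a closed-form ceiling-division item count and a single join.

-- len(s.encode("utf-8")): exact — a Lean String is stored as its UTF-8 bytes, so utf8ByteSize is the byte length
def utf8Len (s : String) : Nat := s.utf8ByteSize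

lemma ofList_utf8ByteSize (l : List Char) :
    (String.ofList l).utf8ByteSize = (l.map Char.utf8Size).sum := by
  induction l with
  | nil => simp
  | cons c cs ih =>
    rw [show String.ofList (c :: cs) = String.singleton c ++ String.ofList cs from
        String.ofList_eq.mpr (by simp),
      String.utf8ByteSize_append, String.utf8ByteSize_singleton, ih, List.map_cons, List.sum_cons]

-- utf8Len as a map-sum, the form the proofs below use
lemma utf8Len_eq_sum (s : String) : utf8Len s = (s.toList.map Char.utf8Size).sum := by
  rw [utf8Len, ← String.ofList_toList (s := s), ofList_utf8ByteSize]
  simp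

-- "".join(parts): exact — String.join concatenates the parts in order with no separator
lemma toList_join_core (parts : List String) :
    (String.join parts).toList = (parts.map String.toList).flatten := by
  have h : ∀ (init : String) (l : List String),
      (List.foldl (fun r s => r ++ s) init l).toList = init.toList ++ (l.map String.toList).flatten := by
    intro init l
    induction l generalizing init with
    | nil => simp
    | cons a as ih => simp [List.foldl_cons, ih, String.toList_append]
  rw [String.join, h]
  simp

-- ===== PORT A =====
def jpItem : String := "\"browserbench-payload\","

-- needed by jpLoop's decreasing_by: appending one item adds exactly 23 bytes
lemma utf8Len_snoc_item (header footer : String) (body : List String) :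
    utf8Len (header ++ String.join (body ++ [jpItem]) ++ footer)
      = utf8Len (header ++ String.join body ++ footer) + 23 := by
  simp only [utf8Len_eq_sum, String.toList_append, toList_join_core, List.map_append,
    List.sum_append, List.flatten_append]
  simp only [List.map_cons, List.map_nil, List.flatten_cons, List.flatten_nil,
    List.append_nil]
  rw [show ((jpItem.toList).map Char.utf8Size).sum = 23 from by decide]
  omega

-- the while-loop of A: keep appending the item while the encoded payload is shorter than the target
def jpLoop (target : Int) (header footer : String) (body : List String) : List String :=
  if (utf8Len (header ++ String.join body ++ footer) : Int) < target then
    jpLoop target header footer (body ++ [jpItem])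
  else body
termination_by (target - utf8Len (header ++ String.join body ++ footer)).toNat
decreasing_by
  rename_i h
  rw [utf8Len_snoc_item]
  omega

-- exact port of str.rstrip(","): drop the trailing ',' characters
def rstripCommas (s : String) : String :=
  String.ofList ((s.toList.reverse.dropWhile (· == ',')).reverse)

def json_payload_py (kb : Int) (variant : String) : String :=
  let header := "{\"variant\":\"" ++ variant ++ "\",\"items\":["
  let footer := "]}"
  let body := jpLoop (kb * 1024 - 32) header footer []
  header ++ rstripCommas (String.join body) ++ footer

-- ===== PORT B =====
def json_payload_py_alt (kb : Int) (variant : String) : String :=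
  let header := "{\"variant\":\"" ++ variant ++ "\",\"items\":["
  let item := "\"browserbench-payload\","
  let need : Int := (kb * 1024 - 32) - utf8Len header - utf8Len "]}"
  let n : Int := max 0 (-(PySem.Int.floordiv (-need) (utf8Len item)))
  header ++ PySem.Str.join "," (List.replicate n.toNat "\"browserbench-payload\"") ++ "]}"

-- ===== PRECONDITION & SPEC =====
def Spec_json_payload_py (kb : Int) (variant : String) (out : String) : Prop := out = json_payload_py_alt kb variant
instance (kb : Int) (variant : String) (out : String) : Decidable (Spec_json_payload_py kb variant out) := by unfold Spec_json_payload_py; infer_instance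

-- ===== CLAIM (what is proved, stated in full; the proofs are below) =====
def Claim_equal_json_payload_py : Prop := ∀ (kb : Int) (variant : String), Dom_json_payload_py kb variant → Spec_json_payload_py kb variant (json_payload_py kb variant)

-- ===== LEMMAS AND PROOFS =====

-- the quoted item without its trailing comma
def jpQuoted : List Char := "\"browserbench-payload\"".toList

lemma jpItem_toList : jpItem.toList = jpQuoted ++ [','] := by decide

lemma flatten_replicate_item_len (k : Nat) :
    ((List.replicate k jpItem.toList).flatten.map Char.utf8Size).sum = 23 * k := by
  induction k with
  | zero => simp
  | succ n ih =>
    rw [List.replicate_succ, List.flatten_cons]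
    simp only [List.map_append, List.sum_append, ih]
    rw [show ((jpItem.toList).map Char.utf8Size).sum = 23 from by decide]
    ring

lemma utf8Len_payload (header : String) (k : Nat) :
    utf8Len (header ++ String.join (List.replicate k jpItem) ++ "]}")
      = utf8Len header + 23 * k + 2 := by
  simp only [utf8Len_eq_sum, String.toList_append, List.map_append, List.sum_append,
    toList_join_core, List.map_replicate]
  rw [flatten_replicate_item_len]
  rw [show (("]}".toList).map Char.utf8Size).sum = 2 from by decide]

-- A's loop, started at k items, stops with exactly N items (N characterised by the loop guard)
lemma jpLoop_eq (target : Int) (header : String) (N : Nat)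
    (hb : ∀ k : Nat, ((utf8Len header : Int) + 23 * k + 2 < target) ↔ k < N) :
    ∀ d k : Nat, k + d = N →
      jpLoop target header "]}" (List.replicate k jpItem) = List.replicate N jpItem := by
  intro d
  induction d with
  | zero =>
    intro k hk
    have hno : ¬ ((utf8Len (header ++ String.join (List.replicate k jpItem) ++ "]}") : Int) < target) := by
      intro hlt
      rw [utf8Len_payload] at hlt
      push_cast at hlt
      have := (hb k).mp (by linarith)
      omega
    rw [jpLoop, if_neg hno]
    have : k = N := by omega
    rw [this]
  | succ d ih =>
    intro k hk
    have hyes : ((utf8Len (header ++ String.join (List.replicate k jpItem) ++ "]}") : Int) < target) := by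
      rw [utf8Len_payload]
      push_cast
      have := (hb k).mpr (by omega)
      linarith
    rw [jpLoop, if_pos hyes, ← List.replicate_succ']
    exact ih (k + 1) (by omega)

-- the loop guard bracket: B's closed-form count is exactly where the guard flips
lemma count_bracket (H target : Int) (k : Nat) :
    (H + 23 * k + 2 < target) ↔
      (k : Int) < max 0 (-(PySem.Int.floordiv (-(target - H - 2)) 23)) := by
  rw [PySem.Int.floordiv_eq_ediv_of_pos (by norm_num : (0:Int) < 23)]
  omega

lemma dropWhile_comma_snoc (F : List Char) :
    ((F ++ jpQuoted ++ [',']).reverse.dropWhile (· == ',')).reverse = F ++ jpQuoted := by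
  have hq : jpQuoted.reverse = '"' :: "daolyap-hcnebresworb\"".toList := by decide
  have h1 : (F ++ jpQuoted ++ [',']).reverse = ',' :: ('"' :: ("daolyap-hcnebresworb\"".toList ++ F.reverse)) := by
    simp [hq]
  rw [h1, List.dropWhile_cons_of_pos (by decide), List.dropWhile_cons_of_neg (by decide)]
  rw [show ('"' :: ("daolyap-hcnebresworb\"".toList ++ F.reverse)) = ('"' :: "daolyap-hcnebresworb\"".toList) ++ F.reverse from rfl,
    ← hq, ← List.reverse_append]
  simp

lemma rstrip_flatten (n : Nat) :
    (((List.replicate n jpItem.toList).flatten.reverse.dropWhile (· == ',')).reverse)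
      = (List.replicate n jpItem.toList).flatten.dropLast := by
  cases n with
  | zero => simp
  | succ m =>
    rw [List.replicate_succ', List.flatten_append]
    simp only [List.flatten_cons, List.flatten_nil, List.append_nil]
    rw [jpItem_toList, ← List.append_assoc, List.dropLast_concat]
    exact dropWhile_comma_snoc _

lemma join_comma_replicate (n : Nat) :
    PySem.Chars.join [','] (List.replicate n jpQuoted)
      = (List.replicate n jpItem.toList).flatten.dropLast := by
  induction n with
  | zero => simp [PySem.Chars.join_nil]
  | succ m ih =>
    cases m with
    | zero =>
      rw [show (0 + 1) = 1 from rfl, List.replicate_one, List.replicate_one,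
        PySem.Chars.join_singleton, List.flatten_cons, List.flatten_nil, List.append_nil,
        jpItem_toList, List.dropLast_concat]
    | succ p =>
      have hne : (List.replicate (p+1) jpItem.toList).flatten ≠ [] := by
        have h23 := flatten_replicate_item_len (p+1)
        intro hnil; rw [hnil] at h23; simp at h23
      rw [show List.replicate (p+1+1) jpQuoted = jpQuoted :: List.replicate (p+1) jpQuoted from List.replicate_succ,
        show List.replicate (p+1) jpQuoted = jpQuoted :: List.replicate p jpQuoted from List.replicate_succ,
        PySem.Chars.join_cons_cons, ← List.replicate_succ, ih,
        show List.replicate (p+1+1) jpItem.toList = jpItem.toList :: List.replicate (p+1) jpItem.toList from List.replicate_succ,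
        List.flatten_cons, List.dropLast_append_of_ne_nil hne, jpItem_toList]

-- middle-part equality, at the String level
lemma middle_eq (n : Nat) :
    rstripCommas (String.join (List.replicate n jpItem))
      = PySem.Str.join "," (List.replicate n "\"browserbench-payload\"") := by
  apply String.toList_inj.mp
  simp only [rstripCommas, String.toList_ofList, toList_join_core, PySem.Str.toList_join,
    List.map_replicate]
  rw [show String.toList "," = [','] from rfl]
  rw [show String.toList "\"browserbench-payload\"" = jpQuoted from rfl]
  rw [join_comma_replicate]
  exact rstrip_flatten n

-- ===== VERDICT (by name: the statement is the Claim_ definition above) =====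
theorem json_payload_py_spec : Claim_equal_json_payload_py := by
  intro kb variant _
  unfold Spec_json_payload_py json_payload_py json_payload_py_alt
  dsimp only
  set header := "{\"variant\":\"" ++ variant ++ "\",\"items\":[" with hhdr
  set target : Int := kb * 1024 - 32 with htarget
  have h23 : ((utf8Len "\"browserbench-payload\"," : Nat) : Int) = 23 := by decide
  have h2 : ((utf8Len "]}" : Nat) : Int) = 2 := by decide
  set nI : Int := max 0 (-(PySem.Int.floordiv (-(target - utf8Len header - utf8Len "]}")) (utf8Len "\"browserbench-payload\","))) with hnI
  have hb : ∀ k : Nat, ((utf8Len header : Int) + 23 * k + 2 < target) ↔ k < nI.toNat := by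
    intro k
    rw [hnI, h23, h2]
    constructor
    · intro h
      have := (count_bracket (utf8Len header) target k).mp h
      omega
    · intro h
      apply (count_bracket (utf8Len header) target k).mpr
      omega
  have hloop : jpLoop target header "]}" [] = List.replicate nI.toNat jpItem := by
    have h0 := jpLoop_eq target header nI.toNat hb nI.toNat 0 (by omega)
    simpa using h0
  rw [hloop, middle_eq]
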